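-- pv_equiv track=rewrite | github.com/nickmachnik/AoC2022 | day5/part2.py | is_stack_line
-- ===== SOURCE A (Python) =====
-- def is_stack_line(line: str):
--     for s in line:
--         if s == ' ':
--             continue
--         elif s == '[':
--             return True
--         else:
--             return False
--     return False
-- ===== SOURCE B (Python) =====
-- def is_stack_line(line: str):
--     i = line.find('[')
--     return i != -1 and line[:i] == ' ' * i
-- ===== Notes on version B (the rewrite author's own statement) =====
-- stated objective: alternative
-- what changed: Instead of scanning for the first non-space character, B locates the first '[' with str.find and then verifies that everything before it is spaces by comparing the prefix with ' ' * i.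
import Mathlib
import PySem

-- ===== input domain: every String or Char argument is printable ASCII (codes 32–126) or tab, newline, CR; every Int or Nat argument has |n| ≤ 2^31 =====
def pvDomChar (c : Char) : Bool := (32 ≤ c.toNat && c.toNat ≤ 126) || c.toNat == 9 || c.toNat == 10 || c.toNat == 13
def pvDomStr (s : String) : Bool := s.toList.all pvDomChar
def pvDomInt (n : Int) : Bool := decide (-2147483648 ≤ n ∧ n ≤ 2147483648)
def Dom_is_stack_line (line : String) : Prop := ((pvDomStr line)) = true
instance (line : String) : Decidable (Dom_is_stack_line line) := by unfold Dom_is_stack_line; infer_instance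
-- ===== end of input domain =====

-- B locates the first '[' with find and checks the prefix before it equals ' ' * i, instead of A's scan for the first non-space character; same value, alternative algorithm.


-- ===== PORT A =====
-- the for-loop over the string's characters, with early returns
def is_stack_line_loop (cs : List Char) : Bool :=
  match cs with
  | [] => false
  | s :: rest =>
    if s == ' ' then is_stack_line_loop rest
    else if s == '[' then true
    else false

def is_stack_line (line : String) : Bool :=
  is_stack_line_loop line.toList

-- ===== PORT B =====
-- i = line.find('['); return i != -1 and line[:i] == ' ' * i
def is_stack_line_alt (line : String) : Bool :=
  let i := PySem.Chars.find line.toList ['[']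
  i != -1 && (PySem.Chars.slice line.toList none (some i) == PySem.List.pyRepeat [' '] i)

-- ===== PRECONDITION & SPEC =====
def Spec_is_stack_line (line : String) (out : Bool) : Prop := out = is_stack_line_alt line
instance (line : String) (out : Bool) : Decidable (Spec_is_stack_line line out) := by unfold Spec_is_stack_line; infer_instance

-- ===== CLAIM =====
def Claim_equal_is_stack_line : Prop := ∀ (line : String), Dom_is_stack_line line → Spec_is_stack_line line (is_stack_line line)

-- ===== LEMMAS AND PROOFS =====
-- characterize find.go for a single-character needle by List.findIdx?
theorem findgo_char (cs : List Char) (k : Nat) :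
    PySem.Chars.find.go ['['] cs k =
      match cs.findIdx? (· = '[') with
      | none => -1
      | some n => (n : Int) + k := by
  induction cs generalizing k with
  | nil => simp [PySem.Chars.find.go]
  | cons c rest ih =>
    by_cases h : c = '['
    · simp [PySem.Chars.find.go, List.isPrefixOf, h, List.findIdx?_cons]
    · have h' : (('[' == c) : Bool) = false := by simp [Ne.symm h]
      simp only [PySem.Chars.find.go, List.isPrefixOf, h', Bool.false_and, ih,
        List.findIdx?_cons]
      simp only [h, decide_false]
      cases rest.findIdx? (· = '[') with
      | none => simp
      | some n => simp [Option.map]; push_cast; ring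

theorem find_char_cons (c : Char) (rest : List Char) (h : c ≠ '[') :
    PySem.Chars.find (c :: rest) ['['] =
      if PySem.Chars.find rest ['['] = -1 then -1 else PySem.Chars.find rest ['['] + 1 := by
  simp only [PySem.Chars.find, findgo_char, List.findIdx?_cons, h, decide_false]
  cases rest.findIdx? (· = '[') with
  | none => simp
  | some n =>
    simp only [Bool.false_eq_true, if_false, Option.map_some]
    split_ifs with h0
    · exfalso
      have hn := Int.natCast_nonneg n
      simp only [Nat.cast_zero, add_zero] at h0
      linarith
    · push_cast; ring

theorem find_char_shape (cs : List Char) :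
    PySem.Chars.find cs ['['] = -1 ∨ ∃ n : Nat, PySem.Chars.find cs ['['] = (n : Int) := by
  simp only [PySem.Chars.find, findgo_char]
  cases cs.findIdx? (· = '[') with
  | none => exact Or.inl rfl
  | some n => exact Or.inr ⟨n, by simp⟩

theorem loop_eq_alt (cs : List Char) :
    is_stack_line_loop cs =
      (let i := PySem.Chars.find cs ['['];
       i != -1 && (PySem.Chars.slice cs none (some i) == PySem.List.pyRepeat [' '] i)) := by
  induction cs with
  | nil => decide
  | cons c rest ih =>
    by_cases hb : c = '['
    · subst hb
      have hf : PySem.Chars.find ('[' :: rest) ['['] = 0 := by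
        simp [PySem.Chars.find, findgo_char, List.findIdx?_cons]
      simp [is_stack_line_loop, hf, PySem.Chars.slice_eq_listSlice,
        PySem.List.slice, PySem.List.pyRepeat]
    · have hb' : ((c == '[') : Bool) = false := by simp [hb]
      rw [show (c :: rest) = (c :: rest) from rfl, find_char_cons c rest hb]
      rcases find_char_shape rest with hneg | ⟨n, hn⟩
      · rw [hneg]
        by_cases hs : c = ' '
        · simp only [is_stack_line_loop, hs, beq_self_eq_true, if_true, ih, hneg]
          simp
        · simp [is_stack_line_loop, hs, hb']
      · have hne : PySem.Chars.find rest ['['] ≠ -1 := by rw [hn]; omega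
        rw [if_neg hne, hn]
        have hslc : PySem.List.slice (c :: rest) none (some ((n : Int) + 1)) =
            c :: List.take n rest := by
          rw [show ((n : Int) + 1) = (((n + 1 : Nat)) : Int) by push_cast; ring,
            PySem.List.slice_to_natCast]
          simp [List.take_succ_cons]
        have hrep : PySem.List.pyRepeat [' '] ((n : Int) + 1) = ' ' :: List.replicate n ' ' := by
          rw [PySem.List.pyRepeat_singleton,
            show ((n : Int) + 1).toNat = n + 1 by omega]
          simp [List.replicate_succ]
        have h1 : (((n : Int) + 1) != -1) = true := by simp; omega
        by_cases hs : c = ' '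
        · subst hs
          simp only [is_stack_line_loop, beq_self_eq_true, if_true, ih, hn]
          have h0 : (((n : Int)) != -1) = true := by simp
          have hsl0 : PySem.List.slice rest none (some ((n : Nat) : Int)) = List.take n rest :=
            PySem.List.slice_to_natCast rest n
          have hrep0 : PySem.List.pyRepeat [' '] ((n : Nat) : Int) = List.replicate n ' ' := by
            rw [PySem.List.pyRepeat_singleton]; simp
          simp [h0, h1, hsl0, hrep0, PySem.Chars.slice_eq_listSlice, hslc, hrep]
        · have hfalse : (c :: List.take n rest == ' ' :: List.replicate n ' ') = false := by
            simp [hs]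
          simp [is_stack_line_loop, hs, hb', h1, PySem.Chars.slice_eq_listSlice, hslc, hrep,
            hfalse]

-- ===== VERDICT =====
theorem is_stack_line_spec : Claim_equal_is_stack_line := by
  intro line _
  unfold Spec_is_stack_line is_stack_line is_stack_line_alt
  exact loop_eq_alt line.toList
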